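-- pv_equiv track=rewrite | github.com/thiagodsti/partiu | backend/parsers/airlines/norwegian.py | _collapse_body
-- ===== SOURCE A (Python) =====
-- def _collapse_body(body: str) -> str:
--     """
--     Normalise the plain-text body: strip trailing whitespace from each line,
--     collapse sequences of blank lines to a single newline, and ensure a
--     trailing newline so the per-flight regex always has a terminating \\n.
--     """
--     lines = [line.rstrip() for line in body.splitlines()]
--     # Collapse multiple consecutive blank lines to one
--     collapsed: list[str] = []
--     prev_blank = False
--     for line in lines:
--         is_blank = line == ""
--         if is_blank and prev_blank:
--             continue
--         collapsed.append(line)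
--         prev_blank = is_blank
--     return "\n".join(collapsed) + "\n"
-- ===== SOURCE B (Python) =====
-- from itertools import groupby
--
--
-- def _collapse_body(body: str) -> str:
--     lines = [line.rstrip() for line in body.splitlines()]
--     result: list[str] = []
--     for is_blank, group in groupby(lines, key=lambda l: l == ""):
--         if is_blank:
--             result.append("")
--         else:
--             result.extend(group)
--     return "\n".join(result) + "\n"
-- ===== Notes on version B (the rewrite author's own statement) =====
-- stated objective: idiomatic
-- what changed: Replaces A's prev_blank state-machine loop with itertools.groupby run-grouping on blankness: one blank line per blank run, whole groups otherwise.
import Mathlib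
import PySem

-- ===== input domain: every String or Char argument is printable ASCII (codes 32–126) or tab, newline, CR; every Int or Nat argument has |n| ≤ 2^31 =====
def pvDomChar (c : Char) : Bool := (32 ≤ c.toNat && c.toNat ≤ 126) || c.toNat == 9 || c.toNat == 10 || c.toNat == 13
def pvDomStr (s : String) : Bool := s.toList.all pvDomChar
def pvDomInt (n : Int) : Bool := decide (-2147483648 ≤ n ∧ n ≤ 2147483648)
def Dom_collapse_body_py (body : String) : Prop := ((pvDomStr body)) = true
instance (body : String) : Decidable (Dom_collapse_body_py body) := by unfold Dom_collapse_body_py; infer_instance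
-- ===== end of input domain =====

-- B replaces A's prev_blank state machine by run-grouping (itertools.groupby on blankness); objective: idiomatic.

-- ===== PORT A =====
def collapse_body_py (body : String) : String :=
  let lines := (PySem.Str.splitlines body).map PySem.Str.rstrip
  let st := lines.foldl (fun (st : List String × Bool) line =>
      let is_blank := line == ""
      if is_blank && st.2 then st
      else (st.1 ++ [line], is_blank)) ([], false)
  PySem.Str.join "\n" st.1 ++ "\n"

-- ===== PORT B =====
-- itertools.groupby on the key (l == ""): consecutive runs of equal blankness
def pvRuns (ls : List String) : List (Bool × List String) :=
  match ls with
  | [] => []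
  | l :: rest =>
    (l == "", l :: rest.takeWhile (fun x => (x == "") == (l == ""))) ::
      pvRuns (rest.dropWhile (fun x => (x == "") == (l == "")))
termination_by ls.length
decreasing_by
  simp only [List.length_cons]
  exact Nat.lt_succ_of_le (List.length_dropWhile_le _ _)

def collapse_body_py_alt (body : String) : String :=
  let lines := (PySem.Str.splitlines body).map PySem.Str.rstrip
  let result := (pvRuns lines).flatMap (fun g => if g.1 then [""] else g.2)
  PySem.Str.join "\n" result ++ "\n"

-- ===== PRECONDITION & SPEC =====
def Spec_collapse_body_py (body : String) (out : String) : Prop := out = collapse_body_py_alt body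
instance (body : String) (out : String) : Decidable (Spec_collapse_body_py body out) := by unfold Spec_collapse_body_py; infer_instance

-- ===== CLAIM (what is proved, stated in full; the proofs are below) =====
def Claim_equal_collapse_body_py : Prop := ∀ (body : String), Dom_collapse_body_py body → Spec_collapse_body_py body (collapse_body_py body)

-- ===== LEMMAS AND PROOFS =====

-- A's loop body, named (definitionally equal to the lambda in the port)
def pvStep (st : List String × Bool) (line : String) : List String × Bool :=
  let is_blank := line == ""
  if is_blank && st.2 then st else (st.1 ++ [line], is_blank)

-- recursive characterisation of A's fold
def pvCollapseRec (prev : Bool) (ls : List String) : List String :=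
  match ls with
  | [] => []
  | l :: rest =>
    if l == "" then
      if prev then pvCollapseRec true rest else "" :: pvCollapseRec true rest
    else l :: pvCollapseRec false rest

theorem pvGetLast_getD_irrel (rest : List String) (h : rest ≠ []) (f : String → Bool)
    (a b : Bool) : ((rest.getLast?).map f).getD a = ((rest.getLast?).map f).getD b := by
  obtain ⟨y, hy⟩ := Option.isSome_iff_exists.mp (List.getLast?_isSome.mpr h)
  simp [hy]

theorem pvFoldl_eq_rec (ls : List String) (acc : List String) (prev : Bool) :
    ls.foldl pvStep (acc, prev)
    = (acc ++ pvCollapseRec prev ls,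
       (ls.getLast?.map (· == "")).getD prev) := by
  induction ls generalizing acc prev with
  | nil => simp [pvCollapseRec]
  | cons l rest ih =>
    rw [List.foldl_cons]
    by_cases hb : l = ""
    · subst hb
      cases prev with
      | true =>
        rw [show pvStep (acc, true) "" = (acc, true) from by simp [pvStep], ih]
        cases rest with
        | nil => simp [pvCollapseRec]
        | cons a t => simp [pvCollapseRec]
      | false =>
        rw [show pvStep (acc, false) "" = (acc ++ [""], true) from by simp [pvStep], ih]
        cases rest with
        | nil => simp [pvCollapseRec]
        | cons a t =>
            simp [pvCollapseRec]
            exact pvGetLast_getD_irrel (a :: t) (by simp) _ _ _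
    · have hl : (l == "") = false := by simp [hb]
      rw [show pvStep (acc, prev) l = (acc ++ [l], l == "") from by simp [pvStep, hl], ih]
      cases rest with
      | nil => simp [pvCollapseRec, hl]
      | cons a t =>
          simp [pvCollapseRec, hl]
          exact pvGetLast_getD_irrel (a :: t) (by simp) _ _ _

theorem pvRec_true_dropBlanks (ls : List String) :
    pvCollapseRec true ls = pvCollapseRec true (ls.dropWhile (· == "")) := by
  induction ls with
  | nil => rfl
  | cons l rest ih =>
    by_cases hb : l = ""
    · subst hb; simpa [pvCollapseRec] using ih
    · have hl : (l == "") = false := by simp [hb]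
      simp [hl]

theorem pvRec_false_nonblank_prefix (t r : List String)
    (ht : ∀ x ∈ t, x ≠ "") :
    pvCollapseRec false (t ++ r) = t ++ pvCollapseRec false r := by
  induction t with
  | nil => rfl
  | cons x xs ih =>
    have hx : x ≠ "" := ht x (by simp)
    have hl : (x == "") = false := by simp [hx]
    simp [pvCollapseRec, hl, ih (fun y hy => ht y (List.mem_cons_of_mem _ hy))]

theorem pvRec_true_eq_false_of_head (ls : List String)
    (h : ∀ x ∈ ls.head?, x ≠ "") :
    pvCollapseRec true ls = pvCollapseRec false ls := by
  cases ls with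
  | nil => rfl
  | cons l rest =>
    have hl : (l == "") = false := by simp [h l (by simp)]
    simp [pvCollapseRec, hl]

theorem pvHead_dropWhile (p : String → Bool) (ls : List String) :
    ∀ x ∈ (ls.dropWhile p).head?, p x = false := by
  induction ls with
  | nil => simp
  | cons l rest ih =>
    by_cases h : p l
    · simpa [List.dropWhile_cons, h] using ih
    · have hl : p l = false := by simpa using h
      intro x hx
      simp [hl] at hx
      subst hx; exact hl

theorem pvRec_eq_runs (ls : List String) :
    pvCollapseRec false ls = (pvRuns ls).flatMap (fun g => if g.1 then [""] else g.2) := by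
  induction ls using pvRuns.induct with
  | case1 => simp [pvRuns, pvCollapseRec]
  | case2 l rest ih =>
    by_cases hb : l = ""
    · subst hb
      have hk : (("" : String) == "") = true := by decide
      rw [pvRuns]
      simp only [hk, beq_true] at ih ⊢
      have h1 : pvCollapseRec true rest
          = pvCollapseRec true (rest.dropWhile (fun x => x == "")) :=
        pvRec_true_dropBlanks rest
      have h2 : pvCollapseRec true (rest.dropWhile (fun x => x == ""))
          = pvCollapseRec false (rest.dropWhile (fun x => x == "")) := by
        apply pvRec_true_eq_false_of_head
        intro x hx
        have := pvHead_dropWhile (fun x => x == "") rest x hx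
        simpa using this
      simp [pvCollapseRec, h1, h2, ih]
    · have hl : (l == "") = false := by simp [hb]
      rw [pvRuns]
      simp only [hl, beq_false] at ih ⊢
      have hpref : ∀ x ∈ rest.takeWhile (fun x => !(x == "")), x ≠ "" := by
        intro x hx
        have := List.mem_takeWhile_imp hx
        simpa using this
      have hdecomp : rest = rest.takeWhile (fun x => !(x == ""))
          ++ rest.dropWhile (fun x => !(x == "")) :=
        (List.takeWhile_append_dropWhile).symm
      have hstep : pvCollapseRec false (l :: rest) = l :: pvCollapseRec false rest := by
        simp [pvCollapseRec, hl]
      rw [hstep]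
      conv_lhs => rw [hdecomp]
      rw [pvRec_false_nonblank_prefix _ _ hpref]
      simp [ih]

-- ===== VERDICT (by name: the statement is the Claim_ definition above) =====
theorem collapse_body_py_spec : Claim_equal_collapse_body_py := by
  intro body _
  unfold Spec_collapse_body_py collapse_body_py collapse_body_py_alt
  rw [show (fun (st : List String × Bool) line =>
      let is_blank := line == ""
      if is_blank && st.2 then st else (st.1 ++ [line], is_blank)) = pvStep from rfl]
  simp only [pvFoldl_eq_rec, pvRec_eq_runs, List.nil_append]
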